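-- pv_equiv track=rewrite | github.com/gabriellaskos/ProvaTecnicaNasajon | prova_tecnica.py | has_repeated_chars_error
-- ===== SOURCE A (Python) =====
-- def has_repeated_chars_error(input_str: str, expected_str: str) -> bool:
--     """
--     Verifica se o input tem um erro de caractere repetido que não existe no esperado.
--     Ex: "Santoo" tem "oo" mas "Santo" não tem.
--     """
--     # Encontra sequências de caracteres repetidos no input
--     i = 0
--     while i < len(input_str) - 1:
--         if input_str[i] == input_str[i + 1]:
--             # Encontrou uma repetição
--             char = input_str[i]
--             count_input = 0
--             j = i
--             while j < len(input_str) and input_str[j] == char: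
--                 count_input += 1
--                 j += 1
--
--             # Conta quantas vezes esse caractere aparece consecutivamente no esperado
--             # na mesma posição relativa
--             count_expected = 0
--             # Procura no esperado por essa mesma sequência
--             for k in range(len(expected_str) - 1):
--                 if expected_str[k] == char:
--                     temp_count = 0
--                     m = k
--                     while m < len(expected_str) and expected_str[m] == char:
--                         temp_count += 1
--                         m += 1
--                     count_expected = max(count_expected, temp_count)
--
--             if count_input > count_expected:
--                 return True
--             i = j
--         else:
--             i += 1
--     return False
-- ===== SOURCE B (Python) =====
-- def _runs(s):
--     """Decompose s into its maximal runs as (char, length) pairs."""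
--     out = []
--     i = 0
--     n = len(s)
--     while i < n:
--         j = i + 1
--         while j < n and s[j] == s[i]:
--             j += 1
--         out.append((s[i], j - i))
--         i = j
--     return out
--
--
-- def has_repeated_chars_error(input_str: str, expected_str: str) -> bool:
--     # One pass over expected_str: longest run per character.
--     max_run = {}
--     for c, length in _runs(expected_str):
--         if length > max_run.get(c, 0):
--             max_run[c] = length
--     # One pass over input_str's runs.
--     return any(length >= 2 and length > max_run.get(c, 0)
--                for c, length in _runs(input_str))
-- ===== Notes on version B (the rewrite author's own statement) =====
-- stated objective: faster
-- what changed: Instead of rescanning all of expected_str with nested run-count loops for every repeated run of input_str, B decomposes both strings into maximal runs once and builds a per-character longest-run dictionary for expected_str, then checks each input run against one dictionary lookup.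
import Mathlib
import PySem

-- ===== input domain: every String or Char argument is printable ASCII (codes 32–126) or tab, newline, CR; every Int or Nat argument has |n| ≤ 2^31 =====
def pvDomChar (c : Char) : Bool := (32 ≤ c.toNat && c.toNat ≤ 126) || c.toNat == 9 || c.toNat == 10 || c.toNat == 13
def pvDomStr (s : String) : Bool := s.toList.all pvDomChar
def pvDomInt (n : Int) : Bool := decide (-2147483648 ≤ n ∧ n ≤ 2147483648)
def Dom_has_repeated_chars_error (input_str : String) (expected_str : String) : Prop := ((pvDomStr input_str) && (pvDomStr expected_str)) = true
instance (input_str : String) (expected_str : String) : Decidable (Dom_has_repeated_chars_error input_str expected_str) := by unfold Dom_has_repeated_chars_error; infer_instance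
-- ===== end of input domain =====

-- B replaces A's per-repetition rescan of expected_str (nested run-count loops) by a single
-- run decomposition of each string and a per-character longest-run dictionary for expected_str.

-- ===== PORT A =====
-- 'while j < len(l) and l[j] == char: count += 1; j += 1' counted from a suffix of the string
def countFrom (l : List Char) (c : Char) : Nat :=
  match l with
  | [] => 0
  | x :: xs => if x = c then countFrom xs c + 1 else 0

-- the 'for k in range(len(expected_str) - 1)' loop computing count_expected
def expCount (e : List Char) (c : Char) : Nat :=
  (List.range (e.length - 1)).foldl
    (fun acc k => if e.getD k ' ' = c then max acc (countFrom (e.drop k) c) else acc) 0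

-- the outer 'while i < len(input_str) - 1' loop of A
def loopA (s : List Char) (e : List Char) (i : Nat) : Bool :=
  if h : i + 1 < s.length then
    if s.getD i ' ' = s.getD (i + 1) ' ' then
      let c := s.getD i ' '
      let ci := countFrom (s.drop i) c
      if expCount e c < ci then true
      else loopA s e (i + ci)
    else loopA s e (i + 1)
  else false
termination_by s.length - i
decreasing_by
  · have hd : s.drop i = s.getD i ' ' :: s.drop (i + 1) := by
      rw [List.getD_eq_getElem s ' ' (by omega)]
      exact List.drop_eq_getElem_cons (by omega)
    have : 1 ≤ countFrom (s.drop i) (s.getD i ' ') := by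
      rw [hd]; simp [countFrom]
    omega
  · omega

def has_repeated_chars_error (input_str : String) (expected_str : String) : Bool :=
  loopA input_str.toList expected_str.toList 0

-- ===== PORT B =====
-- _runs: maximal runs of a string as (char, length) pairs
def runsOf (l : List Char) : List (Char × Nat) :=
  match l with
  | [] => []
  | c :: rest =>
    let k := countFrom rest c
    (c, k + 1) :: runsOf (rest.drop k)
termination_by l.length
decreasing_by
  simp only [List.length_drop, List.length_cons]
  omega

-- the 'for c, length in _runs(expected_str)' loop building max_run
def maxRunDict (rs : List (Char × Nat)) : PySem.Dict Char Nat :=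
  rs.foldl (fun d p => if d.getD p.1 0 < p.2 then d.insert p.1 p.2 else d) PySem.Dict.empty

def has_repeated_chars_error_alt (input_str : String) (expected_str : String) : Bool :=
  let max_run := maxRunDict (runsOf expected_str.toList)
  (runsOf input_str.toList).any (fun p => 2 ≤ p.2 && max_run.getD p.1 0 < p.2)

-- ===== PRECONDITION & SPEC =====
def Spec_has_repeated_chars_error (input_str : String) (expected_str : String) (out : Bool) : Prop := out = has_repeated_chars_error_alt input_str expected_str
instance (input_str : String) (expected_str : String) (out : Bool) : Decidable (Spec_has_repeated_chars_error input_str expected_str out) := by unfold Spec_has_repeated_chars_error; infer_instance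

-- ===== CLAIM (what is proved, stated in full; the proofs are below) =====
def Claim_equal_has_repeated_chars_error : Prop := ∀ (input_str : String) (expected_str : String), Dom_has_repeated_chars_error input_str expected_str → Spec_has_repeated_chars_error input_str expected_str (has_repeated_chars_error input_str expected_str)

-- ===== LEMMAS AND PROOFS =====

-- longest run of c per position, as a structural recursion (reference value both sides reach)
def posMax (e : List Char) (c : Char) : Nat :=
  match e with
  | [] => 0
  | c0 :: rest => max (if c0 = c then countFrom rest c + 1 else 0) (posMax rest c)

-- max over runs of char c (reference value for the dictionary)
def runsMax (rs : List (Char × Nat)) (c : Char) (a : Nat) : Nat :=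
  rs.foldl (fun a p => if p.1 = c then max a p.2 else a) a

theorem runsMax_init (rs : List (Char × Nat)) (c : Char) (a : Nat) :
    runsMax rs c a = max a (runsMax rs c 0) := by
  induction rs generalizing a with
  | nil => simp [runsMax]
  | cons p rs ih =>
    simp only [runsMax, List.foldl_cons] at *
    rw [ih, @ih (if p.1 = c then max 0 p.2 else 0)]
    split <;> omega

theorem getD_maxRunDict (rs : List (Char × Nat)) (d : PySem.Dict Char Nat) (c : Char) :
    (rs.foldl (fun d p => if d.getD p.1 0 < p.2 then d.insert p.1 p.2 else d) d).getD c 0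
      = runsMax rs c (d.getD c 0) := by
  induction rs generalizing d with
  | nil => simp [runsMax]
  | cons p rs ih =>
    simp only [List.foldl_cons, runsMax] at *
    rw [ih]
    congr 1
    by_cases hc : p.1 = c
    · subst hc
      by_cases hlt : d.getD p.1 0 < p.2
      · rw [if_pos hlt, PySem.Dict.getD_insert, if_pos rfl, if_pos rfl]
        omega
      · rw [if_neg hlt, if_pos rfl]
        omega
    · by_cases hlt : d.getD p.1 0 < p.2
      · rw [if_pos hlt, PySem.Dict.getD_insert,
          if_neg (fun hh => hc (Eq.symm hh)), if_neg hc]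
      · rw [if_neg hlt, if_neg hc]

theorem getD_maxRunDict_runs (rs : List (Char × Nat)) (c : Char) :
    (maxRunDict rs).getD c 0 = runsMax rs c 0 := by
  have := getD_maxRunDict rs PySem.Dict.empty c
  simpa [maxRunDict, PySem.Dict.empty] using this

-- the foldl over range(len e) computes posMax
theorem foldl_range_posMax (e : List Char) (c : Char) (a : Nat) :
    (List.range e.length).foldl
      (fun acc k => if e.getD k ' ' = c then max acc (countFrom (e.drop k) c) else acc) a
      = max a (posMax e c) := by
  induction e generalizing a with
  | nil => simp [posMax]
  | cons c0 rest ih =>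
    rw [List.length_cons, List.range_succ_eq_map, List.foldl_cons, List.foldl_map]
    have hstep : ∀ (acc k : Nat),
        (if (c0 :: rest).getD (k + 1) ' ' = c then
            max acc (countFrom ((c0 :: rest).drop (k + 1)) c) else acc)
          = (if rest.getD k ' ' = c then max acc (countFrom (rest.drop k) c) else acc) := by
      intro acc k; rfl
    simp only [hstep]
    rw [ih]
    have h0 : (if (c0 :: rest).getD 0 ' ' = c then
        max a (countFrom ((c0 :: rest).drop 0) c) else a)
        = max a (if c0 = c then countFrom rest c + 1 else 0) := by
      simp only [List.getD_cons_zero, List.drop_zero, countFrom]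
      split <;> rename_i h <;> simp [h] <;> omega
    rw [h0, posMax]
    omega

-- expCount differs from posMax at most by the length-1 run at the very last position
theorem expCount_le_posMax (e : List Char) (c : Char) :
    expCount e c ≤ posMax e c ∧ posMax e c ≤ max (expCount e c) 1 := by
  rcases e.eq_nil_or_concat with rfl | ⟨f, b, rfl⟩
  · simp [expCount, posMax]
  · simp only [List.concat_eq_append]
    have hlen : (f ++ [b]).length = f.length + 1 := by simp
    have hfull := foldl_range_posMax (f ++ [b]) c 0
    rw [hlen, List.range_succ, List.foldl_append] at hfull
    have hpre : (List.range f.length).foldl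
        (fun acc k => if (f ++ [b]).getD k ' ' = c
          then max acc (countFrom ((f ++ [b]).drop k) c) else acc) 0
        = expCount (f ++ [b]) c := by
      simp [expCount, hlen]
    rw [hpre] at hfull
    simp only [List.foldl_cons, List.foldl_nil] at hfull
    have hdrop : (f ++ [b]).drop f.length = [b] := by
      simpa using List.drop_left f [b]
    rw [hdrop] at hfull
    have hcf : countFrom [b] c ≤ 1 := by
      simp only [countFrom]; split <;> simp
    simp only [Nat.zero_max] at hfull
    split at hfull <;> omega

theorem expCount_lt_iff (e : List Char) (c : Char) (L : Nat) (hL : 2 ≤ L) :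
    (expCount e c < L) = (posMax e c < L) := by
  have := expCount_le_posMax e c
  simp only [eq_iff_iff]; omega

-- peeling a run off the front of posMax
theorem posMax_drop_run (k : Nat) (rest : List Char) (c0 c : Char)
    (hk : countFrom rest c0 = k) :
    posMax rest c = max (if c0 = c then k else 0) (posMax (rest.drop k) c) := by
  induction k generalizing rest with
  | zero => simp
  | succ k ih =>
    match rest with
    | [] => simp [countFrom] at hk
    | x :: xs =>
      have hx : x = c0 := by
        by_contra h; simp [countFrom, h] at hk
      subst hx
      have hk' : countFrom xs x = k := by
        simpa [countFrom] using hk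
      rw [posMax, ih xs hk', List.drop_succ_cons]
      by_cases h : x = c
      · subst h; simp [hk']; omega
      · simp [h]

theorem runsOf_nil : runsOf [] = [] := by
  rw [runsOf.eq_def]

theorem runsOf_cons (c : Char) (rest : List Char) :
    runsOf (c :: rest)
      = (c, countFrom rest c + 1) :: runsOf (rest.drop (countFrom rest c)) := by
  rw [runsOf.eq_def]

-- max over the runs of l equals posMax
theorem runsMax_runsOf (l : List Char) (c : Char) :
    runsMax (runsOf l) c 0 = posMax l c := by
  match l with
  | [] => rw [runsOf_nil]; simp [runsMax, posMax]
  | c0 :: rest =>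
    rw [runsOf_cons]
    show runsMax ((c0, countFrom rest c0 + 1) :: runsOf (rest.drop (countFrom rest c0))) c 0
        = posMax (c0 :: rest) c
    rw [show runsMax ((c0, countFrom rest c0 + 1) :: runsOf (rest.drop (countFrom rest c0))) c 0
        = runsMax (runsOf (rest.drop (countFrom rest c0))) c
            (if c0 = c then max 0 (countFrom rest c0 + 1) else 0) from rfl]
    rw [runsMax_init]
    rw [runsMax_runsOf (rest.drop (countFrom rest c0)) c]
    rw [posMax, posMax_drop_run (countFrom rest c0) rest c0 c rfl]
    by_cases h : c0 = c
    · subst h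
      rw [if_pos rfl, if_pos rfl, if_pos rfl]
      omega
    · rw [if_neg h, if_neg h, if_neg h]
      omega
termination_by l.length
decreasing_by
  simp only [List.length_drop, List.length_cons]
  omega

-- A's loop at position i only depends on the suffix from i: it equals auxA (s.drop i)
def auxA (e : List Char) (l : List Char) : Bool :=
  match l with
  | [] => false
  | c0 :: rest =>
    let k := countFrom rest c0
    if k = 0 then auxA e rest
    else if expCount e c0 < k + 1 then true
    else auxA e (rest.drop k)
termination_by l.length
decreasing_by
  · simp
  · simp only [List.length_drop, List.length_cons]
    omega

theorem auxA_nil (e : List Char) : auxA e [] = false := by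
  rw [auxA.eq_def]

theorem auxA_cons (e : List Char) (c0 : Char) (rest : List Char) :
    auxA e (c0 :: rest)
      = (if countFrom rest c0 = 0 then auxA e rest
         else if expCount e c0 < countFrom rest c0 + 1 then true
         else auxA e (rest.drop (countFrom rest c0))) := by
  rw [auxA.eq_def]

theorem loopA_eq_auxA (s e : List Char) (i : Nat) :
    loopA s e i = auxA e (s.drop i) := by
  rw [loopA]
  split <;> rename_i h
  · have hd : s.drop i = s.getD i ' ' :: s.drop (i + 1) := by
      rw [List.getD_eq_getElem s ' ' (by omega)]
      exact List.drop_eq_getElem_cons (by omega)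
    have hd2 : s.drop (i + 1) = s.getD (i + 1) ' ' :: s.drop (i + 2) := by
      rw [List.getD_eq_getElem s ' ' (by omega)]
      exact List.drop_eq_getElem_cons (by omega)
    by_cases heq : s.getD i ' ' = s.getD (i + 1) ' '
    · simp only [if_pos heq]
      have hk : countFrom (s.drop (i + 1)) (s.getD i ' ')
          = countFrom (s.drop (i + 2)) (s.getD i ' ') + 1 := by
        rw [hd2]; simp only [countFrom]; rw [if_pos (Eq.symm heq)]
      have hci : countFrom (s.drop i) (s.getD i ' ')
          = countFrom (s.drop (i + 2)) (s.getD i ' ') + 1 + 1 := by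
        rw [hd]; simp only [countFrom]; rw [if_true, hk]
      rw [hci, hd, auxA_cons]
      simp only [hk]
      rw [if_neg (by omega : ¬ countFrom (s.drop (i + 2)) (s.getD i ' ') + 1 = 0)]
      by_cases hcmp : expCount e (s.getD i ' ')
          < countFrom (s.drop (i + 2)) (s.getD i ' ') + 1 + 1
      · rw [if_pos hcmp, if_pos hcmp]
      · rw [if_neg hcmp, if_neg hcmp,
          loopA_eq_auxA s e (i + (countFrom (s.drop (i + 2)) (s.getD i ' ') + 1 + 1)),
          List.drop_drop]
        have hAB : ∀ a b : Nat, a = b → List.drop a s = List.drop b s :=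
          fun a b hh => by rw [hh]
        exact congrArg (auxA e) (hAB _ _ (by omega))
    · simp only [if_neg heq]
      have hk0 : countFrom (s.drop (i + 1)) (s.getD i ' ') = 0 := by
        rw [hd2]; simp only [countFrom]
        rw [if_neg (fun hh => heq (Eq.symm hh))]
      rw [hd, auxA_cons]
      simp only [hk0, if_pos rfl]
      exact loopA_eq_auxA s e (i + 1)
  · cases hds : s.drop i with
    | nil => rw [auxA_nil]
    | cons x rest =>
      cases rest with
      | nil =>
        rw [auxA_cons]
        simp only [countFrom]
        rw [if_true, auxA_nil]
      | cons y t =>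
        exfalso
        have hl := congrArg List.length hds
        simp only [List.length_drop, List.length_cons] at hl
        omega
termination_by s.length - i
decreasing_by
  all_goals omega

-- auxA is the 'any' over runs with the expCount test
theorem auxA_eq_any (e : List Char) (l : List Char) :
    auxA e l = (runsOf l).any (fun p => 2 ≤ p.2 && decide (expCount e p.1 < p.2)) := by
  match l with
  | [] => rw [auxA_nil, runsOf_nil]; rfl
  | c0 :: rest =>
    rw [runsOf_cons, auxA_cons]
    simp only [List.any_cons]
    by_cases hk : countFrom rest c0 = 0
    · rw [if_pos hk, auxA_eq_any e rest, hk]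
      simp
    · rw [if_neg hk]
      by_cases hcmp : expCount e c0 < countFrom rest c0 + 1
      · have h2 : 2 ≤ countFrom rest c0 + 1 := by omega
        simp [hcmp, h2]
      · rw [if_neg hcmp, auxA_eq_any e (rest.drop (countFrom rest c0))]
        simp [hcmp]
termination_by l.length
decreasing_by
  · simp
  · simp only [List.length_drop, List.length_cons]
    omega

-- ===== VERDICT (by name: the statement is the Claim_ definition above) =====
theorem has_repeated_chars_error_spec : Claim_equal_has_repeated_chars_error := by
  intro input_str expected_str _
  unfold Spec_has_repeated_chars_error
  unfold has_repeated_chars_error has_repeated_chars_error_alt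
  rw [loopA_eq_auxA, List.drop_zero, auxA_eq_any]
  congr 1
  funext p
  rw [getD_maxRunDict_runs, runsMax_runsOf]
  by_cases h2 : 2 ≤ p.2
  · have hlt := expCount_lt_iff expected_str.toList p.1 p.2 h2
    simp only [h2, decide_true, Bool.true_and, hlt]
  · simp [h2]
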